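-- pv_equiv track=rewrite | github.com/ananthlk/mobius-chat | app/state/refined_query.py | last_turn_was_clarification
-- ===== SOURCE A (Python) =====
-- def last_turn_was_clarification(last_turn: dict | None) -> bool:
--     """True if last assistant message looks like a jurisdiction clarification ask."""
--     if not last_turn:
--         return False
--     ac = (last_turn.get("assistant_content") or "").lower()
--     return any(
--         kw in ac
--         for kw in ("health plan", "payer", "which", "specify", "state", "program", "medicare", "medicaid")
--     )
-- ===== SOURCE B (Python) =====
-- _KEYWORDS = ("health plan", "payer", "which", "specify", "state", "program", "medicare", "medicaid")
--
--
-- def _mentions_keyword(text):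
--     """Single left-to-right scan: does any keyword start at some position of text?"""
--     for i in range(len(text)):
--         for kw in _KEYWORDS:
--             if text.startswith(kw, i):
--                 return True
--     return False
--
--
-- def last_turn_was_clarification(last_turn: dict | None) -> bool:
--     """True if last assistant message looks like a jurisdiction clarification ask."""
--     if last_turn:
--         content = last_turn.get("assistant_content")
--         return _mentions_keyword(content.lower() if content else "")
--     return False
-- ===== Notes on version B (the rewrite author's own statement) =====
-- stated objective: alternative
-- what changed: Replaces eight independent whole-string substring searches ('any(kw in ac ...)') by one left-to-right scan of the lowercased text that at each position checks whether some keyword starts there.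
import Mathlib
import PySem

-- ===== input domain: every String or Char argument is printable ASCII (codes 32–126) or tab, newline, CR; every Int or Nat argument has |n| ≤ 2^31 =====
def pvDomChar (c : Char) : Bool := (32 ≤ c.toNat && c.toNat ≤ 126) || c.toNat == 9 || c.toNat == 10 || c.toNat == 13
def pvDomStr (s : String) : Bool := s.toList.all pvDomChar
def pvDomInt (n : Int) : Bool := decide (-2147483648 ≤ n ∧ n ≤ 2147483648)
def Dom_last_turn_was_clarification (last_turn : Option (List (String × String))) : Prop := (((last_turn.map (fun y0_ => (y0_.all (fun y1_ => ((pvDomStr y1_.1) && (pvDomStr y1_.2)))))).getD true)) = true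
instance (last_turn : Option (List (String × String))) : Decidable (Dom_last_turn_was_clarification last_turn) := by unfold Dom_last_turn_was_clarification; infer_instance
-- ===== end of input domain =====

-- B replaces eight independent whole-string substring searches by a single
-- left-to-right scan testing at each position whether some keyword starts there
-- (alternative decomposition; same behaviour on every input).


-- ===== PORT A =====
def last_turn_was_clarification (last_turn : Option (List (String × String))) : Bool :=
  match last_turn with
  | none => false
  | some d =>
    if d = [] then false
    else
      -- ac = (last_turn.get("assistant_content") or "").lower()
      let v := PySem.Dict.get? (PySem.Dict.mk d) "assistant_content"
      let ac := PySem.Str.lower (match v with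
        | none => ""
        | some s => if s = "" then "" else s)
      -- any(kw in ac for kw in (...))
      (["health plan", "payer", "which", "specify", "state",
        "program", "medicare", "medicaid"] : List String).any
        (fun kw => PySem.Str.isIn kw ac)

-- ===== PORT B =====
def pvKeywordsB : List String :=
  ["health plan", "payer", "which", "specify", "state", "program", "medicare", "medicaid"]

-- _mentions_keyword: 'for i in range(len(text)): for kw in _KEYWORDS: if text.startswith(kw, i): return True'
-- as structural recursion over the successive suffixes of the text
def pvMentionsKeyword : List Char → Bool
  | [] => false
  | c :: rest =>
      if (pvKeywordsB.map String.toList).any (fun kw => PySem.Chars.startswith (c :: rest) kw) then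
        true
      else pvMentionsKeyword rest

def last_turn_was_clarification_alt (last_turn : Option (List (String × String))) : Bool :=
  match last_turn with
  | some d =>
    if d.isEmpty then false
    else
      let content := PySem.Dict.get? (PySem.Dict.mk d) "assistant_content"
      pvMentionsKeyword (match content with
        | some s => if s = "" then "".toList else (PySem.Str.lower s).toList
        | none => "".toList)
  | none => false

-- ===== PRECONDITION & SPEC =====
def Spec_last_turn_was_clarification (last_turn : Option (List (String × String))) (out : Bool) : Prop := out = last_turn_was_clarification_alt last_turn
instance (last_turn : Option (List (String × String))) (out : Bool) : Decidable (Spec_last_turn_was_clarification last_turn out) := by unfold Spec_last_turn_was_clarification; infer_instance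

-- ===== CLAIM (what is proved, stated in full; the proofs are below) =====
def Claim_equal_last_turn_was_clarification : Prop := ∀ (last_turn : Option (List (String × String))), Dom_last_turn_was_clarification last_turn → Spec_last_turn_was_clarification last_turn (last_turn_was_clarification last_turn)

-- ===== LEMMAS AND PROOFS =====

-- the position scan finds a keyword iff some keyword is a substring of the text
theorem pvMentionsKeyword_eq_any_isIn :
    ∀ s : List Char,
      pvMentionsKeyword s = (pvKeywordsB.map String.toList).any (fun kw => PySem.Chars.isIn kw s) := by
  intro s
  induction s with
  | nil =>
    rw [pvMentionsKeyword, eq_comm, List.any_eq_false]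
    have hne : ∀ kw ∈ pvKeywordsB.map String.toList, kw ≠ [] := by decide
    intro kw hkw h
    exact hne kw hkw (List.eq_nil_of_infix_nil ((PySem.Chars.isIn_iff_infix _ _).mp h))
  | cons c rest ih =>
    rw [pvMentionsKeyword]
    split
    · rename_i h
      rcases List.any_eq_true.mp h with ⟨kw, hkw, hsw⟩
      symm
      refine List.any_eq_true.mpr ⟨kw, hkw, ?_⟩
      rw [PySem.Chars.isIn_iff_infix]
      exact ((PySem.Chars.startswith_iff _ _).mp hsw).isInfix
    · rename_i h
      rw [ih]
      have hsw := List.any_eq_false.mp (Bool.of_not_eq_true h)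
      cases hcur : (pvKeywordsB.map String.toList).any (fun kw => PySem.Chars.isIn kw (c :: rest)) with
      | true =>
        rcases List.any_eq_true.mp hcur with ⟨kw, hkw, hin⟩
        refine List.any_eq_true.mpr ⟨kw, hkw, ?_⟩
        rw [PySem.Chars.isIn_iff_infix] at hin ⊢
        rcases List.infix_cons_iff.mp hin with hp | hi
        · exact absurd ((PySem.Chars.startswith_iff _ _).mpr hp) (by simp [hsw kw hkw])
        · exact hi
      | false =>
        rw [List.any_eq_false] at hcur ⊢
        intro kw hkw hin
        exact hcur kw hkw ((PySem.Chars.isIn_iff_infix _ _).mpr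
          (List.infix_cons ((PySem.Chars.isIn_iff_infix _ _).mp hin)))

-- B's text argument is exactly A's lowered string
theorem pvText_eq (v : Option String) :
    (match v with
      | some s => if s = "" then "".toList else (PySem.Str.lower s).toList
      | none => ("" : String).toList) =
    (PySem.Str.lower (match v with
      | none => ""
      | some s => if s = "" then "" else s)).toList := by
  cases v with
  | none => rfl
  | some s =>
    by_cases hs : s = ""
    · subst hs; decide
    · simp [hs]

theorem last_turn_was_clarification_spec' (last_turn : Option (List (String × String))) :
    last_turn_was_clarification last_turn = last_turn_was_clarification_alt last_turn := by
  cases last_turn with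
  | none => rfl
  | some d =>
    by_cases hd : d = []
    · simp [last_turn_was_clarification, last_turn_was_clarification_alt, hd]
    · simp only [last_turn_was_clarification, last_turn_was_clarification_alt,
        List.isEmpty_iff, if_neg hd]
      rw [pvText_eq, pvMentionsKeyword_eq_any_isIn]
      simp only [pvKeywordsB, List.map_cons, List.map_nil, List.any_cons, List.any_nil,
        PySem.Str.isIn]

-- ===== VERDICT (by name: the statement is the Claim_ definition above) =====
theorem last_turn_was_clarification_spec : Claim_equal_last_turn_was_clarification := by
  intro lt _
  exact (last_turn_was_clarification_spec' lt).symm ▸ rfl
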